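-- pv_equiv track=rewrite | github.com/henry-the-vietnamese/petals-around-the-rose | main.py | calculatePetals
-- ===== SOURCE A (Python) =====
-- def calculatePetals(diceList):
--     """Docstring for the function calculatePetals().
--
--     Calculate the number of petals around the rose.
--
--     Parameters
--     ----------
--     diceList : list
--         The list whose items are the values of the dice.
--
--     Returns
--     -------
--     int
--         The number of petals around the rose.
--     """
--     petals = 0
--     for face_value in diceList:
--         if face_value == 3:
--             petals += 2
--         elif face_value == 5:
--             petals += 4
--         else:                   # face_value = 1, 2, 4, 6.
--             petals += 0
--     return petals
-- ===== SOURCE B (Python) =====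
-- def calculatePetals(diceList):
--     return 2 * diceList.count(3) + 4 * diceList.count(5)
-- ===== Notes on version B (the rewrite author's own statement) =====
-- stated objective: simpler
-- what changed: Replaces the per-element branch-and-accumulate loop with two counting scans combined by the fixed weights: 2*count(3) + 4*count(5).
import Mathlib
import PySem

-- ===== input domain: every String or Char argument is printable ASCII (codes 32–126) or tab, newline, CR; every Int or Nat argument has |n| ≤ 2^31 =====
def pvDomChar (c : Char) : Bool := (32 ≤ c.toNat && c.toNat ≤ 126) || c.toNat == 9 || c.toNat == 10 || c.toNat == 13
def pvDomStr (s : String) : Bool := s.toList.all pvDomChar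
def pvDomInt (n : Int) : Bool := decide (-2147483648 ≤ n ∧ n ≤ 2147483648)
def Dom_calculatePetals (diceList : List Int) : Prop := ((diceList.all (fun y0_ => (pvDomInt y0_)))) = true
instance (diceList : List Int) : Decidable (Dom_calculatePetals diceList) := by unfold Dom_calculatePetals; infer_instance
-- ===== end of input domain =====

-- B replaces the per-element branch-accumulate loop with two counting scans (2*count(3) + 4*count(5)); objective: simpler.
-- ===== PORT A =====
-- petals = 0; for face_value in diceList: if ==3: +=2 elif ==5: +=4 else: +=0
def calculatePetals (diceList : List Int) : Int :=
  diceList.foldl (fun petals face_value =>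
    if face_value == 3 then petals + 2
    else if face_value == 5 then petals + 4
    else petals + 0) 0

-- ===== PORT B =====
-- B: 2 * diceList.count(3) + 4 * diceList.count(5)
def calculatePetals_alt (diceList : List Int) : Int :=
  2 * (PySem.List.count diceList 3 : Int) + 4 * (PySem.List.count diceList 5 : Int)

-- ===== PRECONDITION & SPEC =====
def Spec_calculatePetals (diceList : List Int) (out : Int) : Prop := out = calculatePetals_alt diceList
instance (diceList : List Int) (out : Int) : Decidable (Spec_calculatePetals diceList out) := by unfold Spec_calculatePetals; infer_instance

-- ===== CLAIM (what is proved, stated in full; the proofs are below) =====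
def Claim_equal_calculatePetals : Prop := ∀ (diceList : List Int), Dom_calculatePetals diceList → Spec_calculatePetals diceList (calculatePetals diceList)

-- ===== LEMMAS AND PROOFS =====

-- ===== VERDICT (by name: the statement is the Claim_ definition above) =====
lemma petals_foldl (xs : List Int) (a : Int) :
    xs.foldl (fun petals face_value =>
      if face_value == 3 then petals + 2
      else if face_value == 5 then petals + 4
      else petals + 0) a
    = a + 2 * (xs.count 3 : Int) + 4 * (xs.count 5 : Int) := by
  induction xs generalizing a with
  | nil => simp
  | cons x xs ih =>
    simp only [List.foldl_cons, ih, List.count_cons]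
    by_cases h3 : x = 3 <;> by_cases h5 : x = 5 <;>
      simp [h3, h5] <;> ring

theorem calculatePetals_spec : Claim_equal_calculatePetals := by
  intro xs _
  unfold Spec_calculatePetals calculatePetals calculatePetals_alt PySem.List.count
  rw [petals_foldl]
  ring
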